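-- pv_equiv track=rewrite | github.com/RaduStefan999/Python-2021-B1_Mihalache_Radu_Stefan | Lab 2/_9_spectators.py | get_nu_pot_viziona
-- ===== SOURCE A (Python) =====
-- def get_nu_pot_viziona (spectator_list) :
--
--     nu_pot_viziona = []
--
--     for column in range( 0, len(spectator_list[0]) ) :
--
--         inalt = 0
--
--         for row in range( 0, len(spectator_list) ) :
--
--             if (spectator_list[row][column] > inalt) :
--                 inalt = spectator_list[row][column]
--             else :
--                 spectator_mic_coord = (row, column)
--                 nu_pot_viziona.append(spectator_mic_coord)
--
--     return nu_pot_viziona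
-- ===== SOURCE B (Python) =====
-- def get_nu_pot_viziona(spectator_list):
--     # table-then-compare: per column, build a prefix-maximum table (seeded with 0),
--     # then emit (row, column) wherever the height does not exceed the prefix max.
--     result = []
--     for column in range(len(spectator_list[0])):
--         heights = [row[column] for row in spectator_list]
--         prefix = [0]
--         for h in heights:
--             prefix.append(max(prefix[-1], h))
--         for r, (p, h) in enumerate(zip(prefix, heights)):
--             if h <= p:
--                 result.append((r, column))
--     return result
-- ===== Notes on version B (the rewrite author's own statement) =====
-- stated objective: alternative
-- what changed: A tracks a running maximum in mutable state and decides each spectator immediately; B first builds, per column, a 0-seeded prefix-maximum table and then a separate compare pass over zip(prefix, heights) emits the blocked coordinates.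
import Mathlib
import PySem

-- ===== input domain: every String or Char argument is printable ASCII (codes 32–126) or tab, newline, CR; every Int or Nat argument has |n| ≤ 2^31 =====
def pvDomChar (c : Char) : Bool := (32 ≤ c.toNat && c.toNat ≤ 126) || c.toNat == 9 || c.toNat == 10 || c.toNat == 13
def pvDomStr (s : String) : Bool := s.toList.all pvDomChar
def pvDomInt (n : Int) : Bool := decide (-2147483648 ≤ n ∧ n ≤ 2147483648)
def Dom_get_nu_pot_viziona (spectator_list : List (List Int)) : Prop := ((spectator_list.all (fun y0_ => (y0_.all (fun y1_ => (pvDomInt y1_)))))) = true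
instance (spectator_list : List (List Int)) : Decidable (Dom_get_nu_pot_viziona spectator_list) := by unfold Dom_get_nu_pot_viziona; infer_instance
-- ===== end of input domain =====

-- B replaces A's running-maximum state machine by a per-column prefix-maximum table
-- built first and then compared against (same cost; objective: alternative decomposition).

-- ===== PORT A =====
def get_nu_pot_viziona (spectator_list : List (List Int)) : List (Int × Int) :=
  (PySem.List.pyRange 0 ((PySem.List.pyGetD spectator_list 0 []).length : Int) 1).foldl
    (fun nu_pot_viziona column =>
      ((PySem.List.pyRange 0 (spectator_list.length : Int) 1).foldl
        (fun (st : Int × List (Int × Int)) row =>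
          if st.1 < PySem.List.pyGetD (PySem.List.pyGetD spectator_list row []) column 0 then
            (PySem.List.pyGetD (PySem.List.pyGetD spectator_list row []) column 0, st.2)
          else
            (st.1, st.2 ++ [(row, column)]))
        (0, nu_pot_viziona)).2)
    []

-- ===== PORT B =====
def get_nu_pot_viziona_alt (spectator_list : List (List Int)) : List (Int × Int) :=
  (PySem.List.pyRange 0 ((PySem.List.pyGetD spectator_list 0 []).length : Int) 1).foldl
    (fun result column =>
      let heights := spectator_list.map (fun row => PySem.List.pyGetD row column 0)
      let prefixTbl := heights.foldl
        (fun pre h => pre ++ [max (PySem.List.pyGetD pre (-1) 0) h]) [0]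
      result ++
        ((PySem.List.enumerate (prefixTbl.zip heights) 0).filter
          (fun p => p.2.2 ≤ p.2.1)).map (fun p => (p.1, column)))
    []

-- ===== PRECONDITION & SPEC =====
-- Pre_ excludes exactly the inputs where the Python raises IndexError: the empty grid
-- (spectator_list[0]) and ragged grids where some row is shorter than row 0.
def Pre_get_nu_pot_viziona (spectator_list : List (List Int)) : Prop :=
  spectator_list ≠ [] ∧ ∀ row ∈ spectator_list, (spectator_list.headD []).length ≤ row.length
instance (spectator_list : List (List Int)) : Decidable (Pre_get_nu_pot_viziona spectator_list) := by
  unfold Pre_get_nu_pot_viziona; infer_instance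
def pvWitness_get_nu_pot_viziona : List (List Int) := [[1, 2], [2, 1]]

def Spec_get_nu_pot_viziona (spectator_list : List (List Int)) (out : List (Int × Int)) : Prop := out = get_nu_pot_viziona_alt spectator_list
instance (spectator_list : List (List Int)) (out : List (Int × Int)) : Decidable (Spec_get_nu_pot_viziona spectator_list out) := by unfold Spec_get_nu_pot_viziona; infer_instance

-- ===== CLAIM (what is proved, stated in full; the proofs are below) =====
def Claim_equal_get_nu_pot_viziona : Prop := ∀ (spectator_list : List (List Int)), Dom_get_nu_pot_viziona spectator_list → Pre_get_nu_pot_viziona spectator_list → Spec_get_nu_pot_viziona spectator_list (get_nu_pot_viziona spectator_list)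

-- ===== LEMMAS AND PROOFS =====

-- running prefix maxima of hs starting from m (without the seed itself)
def pvTailScan (m : Int) : List Int → List Int
  | [] => []
  | h :: t => max m h :: pvTailScan (max m h) t

-- the blocked spectators of one column, as a recursion over its heights
def pvEmit (c i m : Int) : List Int → List (Int × Int)
  | [] => []
  | h :: t => if m < h then pvEmit c (i + 1) h t else (i, c) :: pvEmit c (i + 1) m t

theorem pv_enumerate_snoc {α : Type} (xs : List α) (x : α) (s : Int) :
    PySem.List.enumerate (xs ++ [x]) s
      = PySem.List.enumerate xs s ++ [(s + xs.length, x)] := by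
  induction xs generalizing s with
  | nil => simp [PySem.List.enumerate_nil, PySem.List.enumerate_cons]
  | cons y ys ih =>
      simp [PySem.List.enumerate_cons, ih]
      ring_nf

theorem pv_foldl_range_enumerate {α β : Type} (xs : List α) (d : α)
    (f : β → Int → α → β) (init : β) :
    (PySem.List.pyRange 0 (xs.length : Int) 1).foldl
        (fun st j => f st j (PySem.List.pyGetD xs j d)) init
      = (PySem.List.enumerate xs 0).foldl (fun st p => f st p.1 p.2) init := by
  induction xs using List.reverseRecOn generalizing init with
  | nil => simp [PySem.List.pyRange_one_eq_nil, PySem.List.enumerate_nil]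
  | append_singleton ys y ih =>
      have hlen : ((ys ++ [y]).length : Int) = (ys.length : Int) + 1 := by
        simp
      rw [hlen, PySem.List.pyRange_one_succ_right (by positivity),
          List.foldl_append, pv_enumerate_snoc, List.foldl_append]
      have hcongr :
          (PySem.List.pyRange 0 (ys.length : Int) 1).foldl
              (fun st j => f st j (PySem.List.pyGetD (ys ++ [y]) j d)) init
            = (PySem.List.pyRange 0 (ys.length : Int) 1).foldl
              (fun st j => f st j (PySem.List.pyGetD ys j d)) init := by
        apply PySem.List.foldl_congr_mem
        intro st j hj
        have hj' := (PySem.List.mem_pyRange_one).1 hj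
        have : PySem.List.pyGetD (ys ++ [y]) j d = PySem.List.pyGetD ys j d := by
          rw [PySem.List.pyGetD_eq_getElem _ d (by omega) (by simp; omega),
              PySem.List.pyGetD_eq_getElem _ d (by omega) (by omega)]
          exact List.getElem_append_left _
        rw [this]
      rw [hcongr, ih]
      simp [PySem.List.pyGetD_eq_getElem]

-- A's inner loop over enumerated rows computes pvEmit
theorem pv_innerA (c : Int) (rows : List (List Int)) :
    ∀ (i m : Int) (acc : List (Int × Int)),
    ((PySem.List.enumerate rows i).foldl
        (fun (st : Int × List (Int × Int)) p =>
          if st.1 < PySem.List.pyGetD p.2 c 0 then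
            (PySem.List.pyGetD p.2 c 0, st.2)
          else
            (st.1, st.2 ++ [(p.1, c)]))
        (m, acc)).2
      = acc ++ pvEmit c i m (rows.map (fun row => PySem.List.pyGetD row c 0)) := by
  induction rows with
  | nil => intro i m acc; simp [PySem.List.enumerate_nil, pvEmit]
  | cons r rs ih =>
      intro i m acc
      rw [PySem.List.enumerate_cons]
      by_cases h : m < PySem.List.pyGetD r c 0
      · simp only [List.foldl_cons, List.map_cons, pvEmit, if_pos h]
        exact ih (i + 1) _ acc
      · simp only [List.foldl_cons, List.map_cons, pvEmit, if_neg h]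
        rw [ih (i + 1) m (acc ++ [(i, c)])]
        simp

-- B's filtered enumeration of (prefix max, height) pairs computes pvEmit
theorem pv_innerB (c : Int) (hs : List Int) :
    ∀ (i m : Int),
    ((PySem.List.enumerate ((m :: pvTailScan m hs).zip hs) i).filter
        (fun p => p.2.2 ≤ p.2.1)).map (fun p => (p.1, c))
      = pvEmit c i m hs := by
  induction hs with
  | nil => intro i m; simp [pvTailScan, PySem.List.enumerate_nil, pvEmit]
  | cons h t ih =>
      intro i m
      simp only [pvTailScan, List.zip_cons_cons, PySem.List.enumerate_cons, pvEmit]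
      by_cases hc : m < h
      · simp [hc, show ¬ (h ≤ m) by omega,
              max_eq_right (le_of_lt hc), ih (i + 1) h]
      · simp [hc, show h ≤ m by omega,
              ih (i + 1) m]

theorem pv_last_pyGetD (ys : List Int) (x : Int) :
    PySem.List.pyGetD (ys ++ [x]) (-1) 0 = x := by
  simp [PySem.List.pyGetD, PySem.List.pyGet?, PySem.List.pyIdx?]

-- the prefix-maximum table B builds is the seed followed by pvTailScan
theorem pv_prefix_fold (hs : List Int) :
    ∀ (pre : List Int) (x : Int),
    hs.foldl (fun pre h => pre ++ [max (PySem.List.pyGetD pre (-1) 0) h]) (pre ++ [x])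
      = pre ++ [x] ++ pvTailScan x hs := by
  induction hs with
  | nil => intro pre x; simp [pvTailScan]
  | cons h t ih =>
      intro pre x
      simp only [List.foldl_cons, pv_last_pyGetD, pvTailScan]
      rw [ih (pre ++ [x]) (max x h)]
      simp

theorem pv_prefix_fold_zero (hs : List Int) :
    hs.foldl (fun pre h => pre ++ [max (PySem.List.pyGetD pre (-1) 0) h]) [0]
      = 0 :: pvTailScan 0 hs := by
  simpa using pv_prefix_fold hs [] 0

-- ===== VERDICT (by name: the statement is the Claim_ definition above) =====
theorem get_nu_pot_viziona_spec : Claim_equal_get_nu_pot_viziona := by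
  intro sl _ _
  unfold Spec_get_nu_pot_viziona
  unfold get_nu_pot_viziona get_nu_pot_viziona_alt
  apply PySem.List.foldl_congr_mem
  intro acc c _
  -- A's column body
  rw [pv_foldl_range_enumerate sl ([] : List Int)
        (fun (st : Int × List (Int × Int)) j v =>
          if st.1 < PySem.List.pyGetD v c 0 then (PySem.List.pyGetD v c 0, st.2)
          else (st.1, st.2 ++ [(j, c)])) ((0 : Int), acc)]
  rw [pv_innerA c sl 0 0 acc]
  -- B's column body
  simp only [pv_prefix_fold_zero, pv_innerB c (sl.map (fun row => PySem.List.pyGetD row c 0)) 0 0]
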